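-- pv_equiv track=rewrite | github.com/giuliop/AdvenfOfCode2023 | python/day18.py | dig_border
-- ===== SOURCE A (Python) =====
-- def move(pos, direction, length):
--     """Return the coordinates of the end of a trench of the given length
--        starting from the given position in the given direction."""
--     x, y = pos
--     if direction == 'R':
--         return (x + length, y)
--     if direction == 'L':
--         return (x - length, y)
--     if direction == 'U':
--         return (x, y - length)
--     if direction == 'D':
--         return (x, y + length)
--     raise ValueError(f'Unknown direction: {direction}')
--
-- def dig_border(commands):
--     """Take a list of (direction, length) tuples to dig the trenches and return
--        the border as a set of (x,y) with (0,0) starting point, +x to the right,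
--        +y down"""
--     border = set()
--     current_pos = (0, 0)
--     border.add(current_pos)
--     for cmd in commands:
--         direction, length = cmd
--         for _ in range(int(length)):
--             next_pos = move(current_pos, direction, 1)
--             border.add(next_pos)
--             current_pos = next_pos
--     return border
-- ===== SOURCE B (Python) =====
-- def dig_border(commands):
--     """Take a list of (direction, length) tuples to dig the trenches and return
--        the border as a set of (x,y) with (0,0) starting point, +x to the right,
--        +y down"""
--     # pass 1: accumulate the corner vertices of the trench polygon
--     verts = [(0, 0)]
--     x, y = 0, 0
--     for direction, length in commands:
--         n = int(length)
--         if n > 0: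
--             if direction == 'R':
--                 x += n
--             elif direction == 'L':
--                 x -= n
--             elif direction == 'U':
--                 y -= n
--             elif direction == 'D':
--                 y += n
--             else:
--                 raise ValueError(f'Unknown direction: {direction}')
--             verts.append((x, y))
--     # pass 2: rasterize each edge purely from its two endpoints
--     border = {(0, 0)}
--     for (x0, y0), (x1, y1) in zip(verts, verts[1:]):
--         steps = abs(x1 - x0) + abs(y1 - y0)
--         sx = (x1 > x0) - (x1 < x0)
--         sy = (y1 > y0) - (y1 < y0)
--         for i in range(1, steps + 1):
--             border.add((x0 + sx * i, y0 + sy * i))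
--     return border
-- ===== Notes on version B (the rewrite author's own statement) =====
-- stated objective: alternative
-- what changed: B is a two-phase algorithm: a first pass folds the commands into the ordered list of corner vertices of the trench polygon (jumping the cursor by the whole length), then a second pass rasterizes each edge purely from its two endpoints (sign and Manhattan length of the vertex difference), never looking at direction strings; A instead marks one unit cell per move() call in a single fused walk.
import Mathlib
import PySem

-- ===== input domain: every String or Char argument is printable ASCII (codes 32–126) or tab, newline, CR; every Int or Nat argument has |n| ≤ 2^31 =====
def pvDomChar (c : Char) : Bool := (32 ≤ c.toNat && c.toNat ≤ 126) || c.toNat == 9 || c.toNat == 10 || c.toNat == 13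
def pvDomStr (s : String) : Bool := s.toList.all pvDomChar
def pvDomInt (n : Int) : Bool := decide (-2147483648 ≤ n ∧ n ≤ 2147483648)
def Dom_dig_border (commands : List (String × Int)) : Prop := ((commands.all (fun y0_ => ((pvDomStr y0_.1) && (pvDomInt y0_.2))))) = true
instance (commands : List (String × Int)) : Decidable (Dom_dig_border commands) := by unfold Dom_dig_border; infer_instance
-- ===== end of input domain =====

-- B replaces A's fused unit-step walk by two staged passes: fold commands into the
-- polygon's corner vertices, then rasterize each edge from its endpoints alone
-- (alternative decomposition, same cost).

-- ===== PORT A =====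
-- move: none = ValueError on an unknown direction
def moveA (pos : Int × Int) (direction : String) (length : Int) : Option (Int × Int) :=
  if direction = "R" then some (pos.1 + length, pos.2)
  else if direction = "L" then some (pos.1 - length, pos.2)
  else if direction = "U" then some (pos.1, pos.2 - length)
  else if direction = "D" then some (pos.1, pos.2 + length)
  else none

def dig_border (commands : List (String × Int)) : List (Int × Int) :=
  (commands.foldl (fun st cmd =>
      (List.range cmd.2.toNat).foldl (fun st _ =>
        match moveA st.2 cmd.1 1 with
        | some p => (PySem.Set.add st.1 p, p)
        | none => st)  -- ValueError: unreachable under Pre_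
        st)
    (PySem.Set.add PySem.Set.empty ((0 : Int), (0 : Int)), ((0 : Int), (0 : Int)))).1

-- ===== PORT B =====
-- pass 1 of Source B: fold commands into (verts, x, y)
def digPass1 (commands : List (String × Int)) : List (Int × Int) × Int × Int :=
  commands.foldl (fun (st : List (Int × Int) × Int × Int) cmd =>
      let n := cmd.2
      if n > 0 then
        if cmd.1 = "R" then (st.1 ++ [(st.2.1 + n, st.2.2)], st.2.1 + n, st.2.2)
        else if cmd.1 = "L" then (st.1 ++ [(st.2.1 - n, st.2.2)], st.2.1 - n, st.2.2)
        else if cmd.1 = "U" then (st.1 ++ [(st.2.1, st.2.2 - n)], st.2.1, st.2.2 - n)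
        else if cmd.1 = "D" then (st.1 ++ [(st.2.1, st.2.2 + n)], st.2.1, st.2.2 + n)
        else st  -- ValueError: unreachable under Pre_
      else st)
    ([((0 : Int), (0 : Int))], (0 : Int), (0 : Int))

-- pass 2 of Source B: rasterize one edge (x0,y0)→(x1,y1) into the border set
def rasterEdge (border : PySem.Set (Int × Int)) (e : (Int × Int) × (Int × Int)) :
    PySem.Set (Int × Int) :=
  let steps : Nat := (e.2.1 - e.1.1).natAbs + (e.2.2 - e.1.2).natAbs
  let sx : Int := if e.2.1 > e.1.1 then 1 else if e.2.1 < e.1.1 then -1 else 0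
  let sy : Int := if e.2.2 > e.1.2 then 1 else if e.2.2 < e.1.2 then -1 else 0
  (PySem.List.pyRange 1 ((steps : Int) + 1) 1).foldl
    (fun b i => PySem.Set.add b (e.1.1 + sx * i, e.1.2 + sy * i)) border

def dig_border_alt (commands : List (String × Int)) : List (Int × Int) :=
  let verts := (digPass1 commands).1
  (verts.zip (verts.drop 1)).foldl rasterEdge
    (PySem.Set.ofList [((0 : Int), (0 : Int))])

-- ===== PRECONDITION & SPEC =====
-- Pre_ excludes exactly the inputs on which A (and B) raise ValueError:
-- a command with an unknown direction and a positive length.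
def Pre_dig_border (commands : List (String × Int)) : Prop :=
  (commands.all (fun c => decide (c.2 ≤ 0) || (c.1 = "R" || c.1 = "L" || c.1 = "U" || c.1 = "D"))) = true
instance (commands : List (String × Int)) : Decidable (Pre_dig_border commands) := by unfold Pre_dig_border; infer_instance

def pvWitness_dig_border : (List (String × Int)) := [("R", 2), ("D", 1), ("L", 2), ("U", 1)]

def Spec_dig_border (commands : List (String × Int)) (out : List (Int × Int)) : Prop := out = dig_border_alt commands
instance (commands : List (String × Int)) (out : List (Int × Int)) : Decidable (Spec_dig_border commands out) := by unfold Spec_dig_border; infer_instance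

-- ===== CLAIM (what is proved, stated in full; the proofs are below) =====
def Claim_equal_dig_border : Prop := ∀ (commands : List (String × Int)), Dom_dig_border commands → Pre_dig_border commands → Spec_dig_border commands (dig_border commands)

-- ===== LEMMAS AND PROOFS =====

-- the corner vertices produced by pass 1 after the start vertex, as a recursion (proof-side)
def vertsFrom : List (String × Int) → Int → Int → List (Int × Int)
  | [], _, _ => []
  | c :: cs, x, y =>
    if c.2 > 0 then
      if c.1 = "R" then (x + c.2, y) :: vertsFrom cs (x + c.2) y
      else if c.1 = "L" then (x - c.2, y) :: vertsFrom cs (x - c.2) y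
      else if c.1 = "U" then (x, y - c.2) :: vertsFrom cs x (y - c.2)
      else if c.1 = "D" then (x, y + c.2) :: vertsFrom cs x (y + c.2)
      else vertsFrom cs x y
    else vertsFrom cs x y

theorem pass1_verts : ∀ (cs : List (String × Int)) (acc : List (Int × Int)) (x y : Int),
    (cs.foldl (fun (st : List (Int × Int) × Int × Int) cmd =>
      let n := cmd.2
      if n > 0 then
        if cmd.1 = "R" then (st.1 ++ [(st.2.1 + n, st.2.2)], st.2.1 + n, st.2.2)
        else if cmd.1 = "L" then (st.1 ++ [(st.2.1 - n, st.2.2)], st.2.1 - n, st.2.2)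
        else if cmd.1 = "U" then (st.1 ++ [(st.2.1, st.2.2 - n)], st.2.1, st.2.2 - n)
        else if cmd.1 = "D" then (st.1 ++ [(st.2.1, st.2.2 + n)], st.2.1, st.2.2 + n)
        else st
      else st) (acc, x, y)).1 = acc ++ vertsFrom cs x y := by
  intro cs
  induction cs with
  | nil => intro acc x y; simp [vertsFrom]
  | cons c cs ih =>
    intro acc x y
    simp only [List.foldl_cons, vertsFrom]
    by_cases h0 : c.2 > 0
    · simp only [if_pos h0]
      by_cases hR : c.1 = "R"
      · simp [hR, ih]
      · by_cases hL : c.1 = "L"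
        · simp [hL, ih]
        · by_cases hU : c.1 = "U"
          · simp [hU, ih]
          · by_cases hD : c.1 = "D"
            · simp [hD, ih]
            · simp [hR, hL, hU, hD, ih]
    · simp [if_neg h0, ih]

-- A's inner unit-step loop equals the bulk rasterization with a fixed unit delta.
theorem walk_eq (d : String) (dx dy : Int)
    (h : ∀ x y : Int, moveA (x, y) d 1 = some (x + dx, y + dy)) :
    ∀ (n : Nat) (s : PySem.Set (Int × Int)) (x y : Int),
      (List.range n).foldl (fun st _ =>
          match moveA st.2 d 1 with
          | some p => (PySem.Set.add st.1 p, p)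
          | none => st) (s, (x, y))
      = ((PySem.List.pyRange 1 ((n : Int) + 1) 1).foldl
           (fun b i => PySem.Set.add b (x + dx * i, y + dy * i)) s,
         (x + dx * n, y + dy * n)) := by
  intro n
  induction n with
  | zero =>
    intro s x y
    simp [PySem.List.pyRange_one_eq_nil]
  | succ n ih =>
    intro s x y
    rw [List.range_succ, List.foldl_append, ih]
    have h2 : PySem.List.pyRange 1 ((n : Int) + 1 + 1) 1
        = PySem.List.pyRange 1 ((n : Int) + 1) 1 ++ [(n : Int) + 1] := by
      have := PySem.List.pyRange_one_succ_right (a := 1) (b := (n : Int) + 1) (by omega)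
      simpa using this
    push_cast
    rw [h2, List.foldl_append]
    simp only [List.foldl, h]
    have e1 : x + dx * (n : Int) + dx = x + dx * ((n : Int) + 1) := by ring
    have e2 : y + dy * (n : Int) + dy = y + dy * ((n : Int) + 1) := by ring
    rw [e1, e2]

-- rasterEdge on an axis-aligned edge, one lemma per direction
theorem rasterEdge_R (s : PySem.Set (Int × Int)) (x y n : Int) (h : 0 < n) :
    rasterEdge s ((x, y), (x + n, y))
      = (PySem.List.pyRange 1 ((n.toNat : Int) + 1) 1).foldl
          (fun b i => PySem.Set.add b (x + 1 * i, y + 0 * i)) s := by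
  simp only [rasterEdge]
  rw [if_pos (show x + n > x by omega), if_neg (show ¬ (y > y) by omega),
    if_neg (show ¬ (y < y) by omega),
    show (((x + n - x).natAbs + (y - y).natAbs : Nat) : Int) = (n.toNat : Int) by omega]

theorem rasterEdge_L (s : PySem.Set (Int × Int)) (x y n : Int) (h : 0 < n) :
    rasterEdge s ((x, y), (x - n, y))
      = (PySem.List.pyRange 1 ((n.toNat : Int) + 1) 1).foldl
          (fun b i => PySem.Set.add b (x + -1 * i, y + 0 * i)) s := by
  simp only [rasterEdge]
  rw [if_neg (show ¬ (x - n > x) by omega), if_pos (show x - n < x by omega),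
    if_neg (show ¬ (y > y) by omega), if_neg (show ¬ (y < y) by omega),
    show (((x - n - x).natAbs + (y - y).natAbs : Nat) : Int) = (n.toNat : Int) by omega]

theorem rasterEdge_U (s : PySem.Set (Int × Int)) (x y n : Int) (h : 0 < n) :
    rasterEdge s ((x, y), (x, y - n))
      = (PySem.List.pyRange 1 ((n.toNat : Int) + 1) 1).foldl
          (fun b i => PySem.Set.add b (x + 0 * i, y + -1 * i)) s := by
  simp only [rasterEdge]
  rw [if_neg (show ¬ (x > x) by omega), if_neg (show ¬ (x < x) by omega),
    if_neg (show ¬ (y - n > y) by omega), if_pos (show y - n < y by omega),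
    show (((x - x).natAbs + (y - n - y).natAbs : Nat) : Int) = (n.toNat : Int) by omega]

theorem rasterEdge_D (s : PySem.Set (Int × Int)) (x y n : Int) (h : 0 < n) :
    rasterEdge s ((x, y), (x, y + n))
      = (PySem.List.pyRange 1 ((n.toNat : Int) + 1) 1).foldl
          (fun b i => PySem.Set.add b (x + 0 * i, y + 1 * i)) s := by
  simp only [rasterEdge]
  rw [if_neg (show ¬ (x > x) by omega), if_neg (show ¬ (x < x) by omega),
    if_pos (show y + n > y by omega),
    show (((x - x).natAbs + (y + n - y).natAbs : Nat) : Int) = (n.toNat : Int) by omega]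

-- rasterizing the consecutive-vertex edges of vertsFrom equals A's fused walk
theorem pass2_eq : ∀ (cs : List (String × Int)),
    (∀ c ∈ cs, (decide (c.2 ≤ 0) || (c.1 = "R" || c.1 = "L" || c.1 = "U" || c.1 = "D")) = true) →
    ∀ (s : PySem.Set (Int × Int)) (x y : Int),
    ((((x, y) :: vertsFrom cs x y).zip (vertsFrom cs x y)).foldl rasterEdge s)
      = (cs.foldl (fun st cmd =>
          (List.range cmd.2.toNat).foldl (fun st _ =>
            match moveA st.2 cmd.1 1 with
            | some p => (PySem.Set.add st.1 p, p)
            | none => st) st) (s, (x, y))).1 := by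
  intro cs
  induction cs with
  | nil => intro _ s x y; simp [vertsFrom]
  | cons c cs ih =>
    intro hall s x y
    have hc := hall c (by simp)
    have htail := fun c hc => hall c (List.mem_cons_of_mem _ hc)
    simp only [List.foldl_cons, vertsFrom]
    by_cases h0 : c.2 > 0
    · have hd : c.1 = "R" ∨ c.1 = "L" ∨ c.1 = "U" ∨ c.1 = "D" := by
        simp [decide_eq_true_eq] at hc
        rcases hc with hc | hc
        · omega
        · tauto
      rcases hd with hd | hd | hd | hd
      · -- R
        simp only [hd, if_pos h0, String.reduceEq, reduceIte, List.zip_cons_cons,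
          List.foldl_cons]
        rw [walk_eq "R" 1 0 (by intro x y; simp [moveA]) c.2.toNat s x y,
          show x + 1 * (c.2.toNat : Int) = x + c.2 by omega,
          show y + 0 * (c.2.toNat : Int) = y by omega,
          ← ih htail, rasterEdge_R s x y c.2 h0]
      · -- L
        simp only [hd, if_pos h0, String.reduceEq, reduceIte, List.zip_cons_cons,
          List.foldl_cons]
        rw [walk_eq "L" (-1) 0 (by intro x y; simp [moveA, Prod.ext_iff]; omega) c.2.toNat s x y,
          show x + -1 * (c.2.toNat : Int) = x - c.2 by omega,
          show y + 0 * (c.2.toNat : Int) = y by omega,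
          ← ih htail, rasterEdge_L s x y c.2 h0]
      · -- U
        simp only [hd, if_pos h0, String.reduceEq, reduceIte, List.zip_cons_cons,
          List.foldl_cons]
        rw [walk_eq "U" 0 (-1) (by intro x y; simp [moveA, Prod.ext_iff]; omega) c.2.toNat s x y,
          show x + 0 * (c.2.toNat : Int) = x by omega,
          show y + -1 * (c.2.toNat : Int) = y - c.2 by omega,
          ← ih htail, rasterEdge_U s x y c.2 h0]
      · -- D
        simp only [hd, if_pos h0, String.reduceEq, reduceIte, List.zip_cons_cons,
          List.foldl_cons]
        rw [walk_eq "D" 0 1 (by intro x y; simp [moveA]) c.2.toNat s x y,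
          show x + 0 * (c.2.toNat : Int) = x by omega,
          show y + 1 * (c.2.toNat : Int) = y + c.2 by omega,
          ← ih htail, rasterEdge_D s x y c.2 h0]
    · simp only [if_neg h0]
      rw [show c.2.toNat = 0 by omega]
      simp only [List.range_zero, List.foldl_nil]
      exact ih htail s x y

-- ===== VERDICT (by name: the statement is the Claim_ definition above) =====
theorem dig_border_spec : Claim_equal_dig_border := by
  unfold Claim_equal_dig_border
  intro commands _ hpre
  unfold Spec_dig_border dig_border dig_border_alt digPass1
  simp only [Pre_dig_border, List.all_eq_true] at hpre
  rw [pass1_verts]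
  simp only [List.cons_append, List.nil_append, List.drop_succ_cons, List.drop_zero]
  rw [pass2_eq commands (fun c hc => hpre c hc)]
  congr 1
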